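-- pv_equiv track=rewrite | github.com/MauriceCalvert/andante | motifs/subject_gen/contour.py | _find_low_climax
-- ===== SOURCE A (Python) =====
-- def _find_low_climax(pitches: list[int]) -> tuple[int, int]:
--     """Find unique low-point index and pitch, or (-1, 0) if none."""
--     lo_val = min(pitches)
--     candidates = [i for i in range(len(pitches)) if pitches[i] == lo_val]
--     if len(candidates) != 1:
--         return (-1, 0)
--     ci = candidates[0]
--     if ci == 0 or ci == len(pitches) - 1:
--         return (-1, 0)
--     if pitches[ci + 1] <= pitches[ci]:
--         return (-1, 0)
--     return (ci, lo_val)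
-- ===== SOURCE B (Python) =====
-- def _find_low_climax(pitches: list[int]) -> tuple[int, int]:
--     """Find unique low-point index and pitch, or (-1, 0) if none."""
--     best = None  # (min value, first index of it, count of it)
--     for i, p in enumerate(pitches):
--         if best is None or p < best[0]:
--             best = (p, i, 1)
--         elif p == best[0]:
--             best = (best[0], best[1], best[2] + 1)
--     if best is None:
--         raise ValueError("min() arg is an empty sequence")
--     val, idx, cnt = best
--     if cnt == 1 and 0 < idx < len(pitches) - 1:
--         return (idx, val)
--     return (-1, 0)
-- ===== Notes on version B (the rewrite author's own statement) =====
-- stated objective: alternative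
-- what changed: Replaced A's min() scan plus a materialised candidate-index list (two extra passes over the data) by a single enumerate pass that maintains the running minimum, the index of its first occurrence and a count of its occurrences, and dropped the neighbour comparison, which can never fire when the minimum is unique and interior.
import Mathlib
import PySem

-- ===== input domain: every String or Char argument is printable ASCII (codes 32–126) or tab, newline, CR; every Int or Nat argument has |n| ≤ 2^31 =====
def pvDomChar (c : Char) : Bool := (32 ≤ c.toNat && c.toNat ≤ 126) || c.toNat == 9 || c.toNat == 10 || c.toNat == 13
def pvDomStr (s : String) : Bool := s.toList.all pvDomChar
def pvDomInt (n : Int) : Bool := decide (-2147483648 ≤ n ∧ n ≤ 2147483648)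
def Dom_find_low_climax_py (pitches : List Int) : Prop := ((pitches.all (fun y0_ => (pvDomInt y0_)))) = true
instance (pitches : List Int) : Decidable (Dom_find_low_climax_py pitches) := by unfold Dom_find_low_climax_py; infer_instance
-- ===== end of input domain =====

-- B replaces A's min()-scan plus a materialised candidate-index list by ONE enumerate pass
-- keeping (current min, first index of it, count of it); objective: alternative single-pass
-- decomposition (the neighbour guard disappears: with a unique interior minimum it never fires).

-- ===== PORT A =====
def find_low_climax_py (pitches : List Int) : Int × Int :=
  match PySem.List.min? pitches (fun y => y) with
  | none => (-1, 0)  -- min([]) raises ValueError; excluded by Pre_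
  | some lo_val =>
    let candidates := (PySem.List.pyRange 0 (pitches.length : Int) 1).filter
      (fun i => PySem.List.pyGetD pitches i 0 == lo_val)
    if candidates.length ≠ 1 then (-1, 0)
    else
      let ci := PySem.List.pyGetD candidates 0 0
      if ci = 0 ∨ ci = (pitches.length : Int) - 1 then (-1, 0)
      else if PySem.List.pyGetD pitches (ci + 1) 0 ≤ PySem.List.pyGetD pitches ci 0 then (-1, 0)
      else (ci, lo_val)

-- ===== PORT B =====
-- loop body of B: best is None / p < best[0] / p == best[0] / otherwise
def flcStep (best : Option (Int × Int × Int)) (ip : Int × Int) : Option (Int × Int × Int) :=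
  match best with
  | none => some (ip.2, ip.1, 1)
  | some (v, idx, c) =>
    if ip.2 < v then some (ip.2, ip.1, 1)
    else if ip.2 = v then some (v, idx, c + 1)
    else some (v, idx, c)

def find_low_climax_py_alt (pitches : List Int) : Int × Int :=
  match (PySem.List.enumerate pitches).foldl flcStep none with
  | none => (-1, 0)  -- best is None: B raises ValueError; excluded by Pre_
  | some (val, idx, cnt) =>
    if cnt = 1 ∧ 0 < idx ∧ idx < (pitches.length : Int) - 1 then (idx, val)
    else (-1, 0)

-- ===== PRECONDITION & SPEC =====
-- On [] A's min() raises ValueError (and B raises too), so the empty list is excluded.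
def Pre_find_low_climax_py (pitches : List Int) : Prop := pitches ≠ []
instance (pitches : List Int) : Decidable (Pre_find_low_climax_py pitches) := by
  unfold Pre_find_low_climax_py; infer_instance
def pvWitness_find_low_climax_py : List Int := [3, 1, 2]

def Spec_find_low_climax_py (pitches : List Int) (out : Int × Int) : Prop := out = find_low_climax_py_alt pitches
instance (pitches : List Int) (out : Int × Int) : Decidable (Spec_find_low_climax_py pitches out) := by unfold Spec_find_low_climax_py; infer_instance

-- ===== CLAIM (what is proved, stated in full; the proofs are below) =====
def Claim_equal_find_low_climax_py : Prop := ∀ (pitches : List Int), Dom_find_low_climax_py pitches → Pre_find_low_climax_py pitches → Spec_find_low_climax_py pitches (find_low_climax_py pitches)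

-- ===== LEMMAS AND PROOFS =====

-- indices (as Nats, in increasing order) at which xs holds the value v
def natIdxs : List Int → Int → List Nat
  | [], _ => []
  | x :: t, v => (if x = v then [0] else []) ++ (natIdxs t v).map (· + 1)

theorem natIdxs_eq_filter (xs : List Int) (v : Int) :
    natIdxs xs v = (List.range xs.length).filter (fun k => xs.getD k 0 == v) := by
  induction xs with
  | nil => simp [natIdxs]
  | cons x t ih =>
    simp only [natIdxs, List.length_cons, List.range_succ_eq_map, List.filter_cons,
      List.filter_map, ih]
    by_cases h : x = v <;> simp [h, Function.comp_def]

theorem mem_natIdxs (xs : List Int) (v : Int) (k : Nat) :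
    k ∈ natIdxs xs v ↔ k < xs.length ∧ xs.getD k 0 = v := by
  rw [natIdxs_eq_filter]
  simp [List.mem_filter]

theorem length_natIdxs (xs : List Int) (v : Int) :
    (natIdxs xs v).length = xs.count v := by
  induction xs with
  | nil => simp [natIdxs]
  | cons x t ih =>
    by_cases h : x = v <;>
      simp [natIdxs, h, ih]

theorem natIdxs_ne_nil (xs : List Int) (v : Int) (h : v ∈ xs) : natIdxs xs v ≠ [] := by
  intro hnil
  have := length_natIdxs xs v
  rw [hnil] at this
  have : xs.count v = 0 := by simpa using this.symm
  rw [List.count_eq_zero] at this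
  exact this h

-- pure recursion computing B's fold state
def fState : List Int → Int → (Int × Int × Int) → (Int × Int × Int)
  | [], _, st => st
  | p :: rest, s, (v, idx, c) =>
    if p < v then fState rest (s + 1) (p, s, 1)
    else if p = v then fState rest (s + 1) (v, idx, c + 1)
    else fState rest (s + 1) (v, idx, c)

theorem foldl_flcStep_some (xs : List Int) (s v idx c : Int) :
    (PySem.List.enumerate xs s).foldl flcStep (some (v, idx, c)) = some (fState xs s (v, idx, c)) := by
  induction xs generalizing s v idx c with
  | nil => simp [fState, PySem.List.enumerate_nil]
  | cons p rest ih =>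
    rw [PySem.List.enumerate_cons]
    simp only [List.foldl_cons, flcStep, fState]
    split_ifs with h1 h2 <;> simp [ih]

theorem natIdxs_cons_self (v : Int) (t : List Int) :
    natIdxs (v :: t) v = 0 :: (natIdxs t v).map (· + 1) := by simp [natIdxs]

theorem natIdxs_cons_ne (x v : Int) (t : List Int) (h : x ≠ v) :
    natIdxs (x :: t) v = (natIdxs t v).map (· + 1) := by simp [natIdxs, h]

theorem headD_map_succ (l : List Nat) (h : l ≠ []) :
    ((((l.map (· + 1)).headD 0) : Nat) : Int) = ((l.headD 0 : Nat) : Int) + 1 := by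
  obtain ⟨a, l', rfl⟩ := List.exists_cons_of_ne_nil h
  simp only [List.map_cons, List.headD_cons]
  omega

theorem count_cons_ne (x v : Int) (t : List Int) (h : x ≠ v) :
    (x :: t).count v = t.count v := by
  simp [h]

theorem count_cons_self' (v : Int) (t : List Int) :
    (v :: t).count v = t.count v + 1 := by
  simp

theorem fState_spec (xs : List Int) (s v idx c : Int) :
    fState xs s (v, idx, c) =
      (xs.foldl min v,
       (if xs.foldl min v = v then idx
        else s + ((natIdxs xs (xs.foldl min v)).headD 0 : Int)),
       (if xs.foldl min v = v then c else 0) + (xs.count (xs.foldl min v) : Int)) := by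
  induction xs generalizing s v idx c with
  | nil => simp [fState]
  | cons p rest ih =>
    simp only [fState, List.foldl_cons]
    by_cases h1 : p < v
    · have hmvp : min v p = p := min_eq_right h1.le
      simp only [hmvp]
      rw [if_pos h1]
      rw [ih]
      have hle := (PySem.List.foldl_min_le rest p).1
      have hmem := PySem.List.foldl_min_mem rest p
      have hMv : rest.foldl min p ≠ v := by omega
      simp only [if_neg hMv]
      by_cases h2 : rest.foldl min p = p
      · simp only [if_pos h2]
        rw [h2, natIdxs_cons_self, count_cons_self']
        simp only [List.headD_cons, Prod.mk.injEq]
        refine ⟨by trivial, by simp, by push_cast; ring⟩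
      · have hmemr : rest.foldl min p ∈ rest := hmem.resolve_left h2
        have hpM : p ≠ rest.foldl min p := fun h => h2 h.symm
        simp only [if_neg h2]
        rw [natIdxs_cons_ne _ _ _ hpM, count_cons_ne _ _ _ hpM]
        have hne : natIdxs rest (rest.foldl min p) ≠ [] :=
          natIdxs_ne_nil _ _ hmemr
        simp only [Prod.mk.injEq, headD_map_succ _ hne]
        refine ⟨by trivial, by ring, by trivial⟩
    · have hmvp : min v p = v := min_eq_left (by omega)
      simp only [hmvp]
      have hle := (PySem.List.foldl_min_le rest v).1
      have hmem := PySem.List.foldl_min_mem rest v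
      by_cases h2 : p = v
      · rw [if_neg h1]
        rw [if_pos h2]
        rw [ih]
        by_cases h3 : rest.foldl min v = v
        · simp only [if_pos h3]
          rw [h3, h2, count_cons_self']
          simp only [Prod.mk.injEq]
          refine ⟨by trivial, by trivial, by push_cast; ring⟩
        · have hmemr : rest.foldl min v ∈ rest := hmem.resolve_left h3
          have hpM : p ≠ rest.foldl min v := fun h => h3 (h2 ▸ h).symm
          simp only [if_neg h3]
          rw [natIdxs_cons_ne _ _ _ hpM, count_cons_ne _ _ _ hpM]
          have hne : natIdxs rest (rest.foldl min v) ≠ [] :=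
            natIdxs_ne_nil _ _ hmemr
          simp only [Prod.mk.injEq, headD_map_succ _ hne]
          refine ⟨by trivial, by ring, by trivial⟩
      · rw [if_neg h1]
        rw [if_neg h2]
        rw [ih]
        by_cases h3 : rest.foldl min v = v
        · have hpM : p ≠ rest.foldl min v := fun h => h2 (h.trans h3)
          simp only [if_pos h3]
          rw [count_cons_ne _ _ _ hpM]
        · have hmemr : rest.foldl min v ∈ rest := hmem.resolve_left h3
          have hpM : p ≠ rest.foldl min v := by
            intro h
            have := (PySem.List.foldl_min_le rest v).1
            omega
          simp only [if_neg h3]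
          rw [natIdxs_cons_ne _ _ _ hpM, count_cons_ne _ _ _ hpM]
          have hne : natIdxs rest (rest.foldl min v) ≠ [] :=
            natIdxs_ne_nil _ _ hmemr
          simp only [Prod.mk.injEq, headD_map_succ _ hne]
          refine ⟨by trivial, by ring, by trivial⟩


theorem candidates_eq (xs : List Int) (v : Int) :
    (PySem.List.pyRange 0 (xs.length : Int) 1).filter
        (fun i => PySem.List.pyGetD xs i 0 == v)
      = (natIdxs xs v).map (fun (k : Nat) => (k : Int)) := by
  rw [natIdxs_eq_filter, PySem.List.pyRange_zero_nat, List.filter_map]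
  refine congrArg _ (List.filter_congr ?_)
  intro k _
  simp [Function.comp, PySem.List.pyGetD_natCast]

theorem find_low_climax_py_spec : Claim_equal_find_low_climax_py := by
  unfold Claim_equal_find_low_climax_py
  intro pitches _ hpre
  unfold Spec_find_low_climax_py
  obtain ⟨x, t, rfl⟩ := List.exists_cons_of_ne_nil hpre
  -- reduce B to the (min, first index, count) triple
  simp only [find_low_climax_py_alt, PySem.List.enumerate_cons, List.foldl_cons, flcStep,
    foldl_flcStep_some, fState_spec]
  -- reduce A
  simp only [find_low_climax_py, PySem.List.min?_id_cons]
  rw [candidates_eq]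
  have hle := (PySem.List.foldl_min_le t x).1
  have hlem := (PySem.List.foldl_min_le t x).2
  have hmem := PySem.List.foldl_min_mem t x
  -- B's index and count equal head/length of natIdxs of the whole list
  have hI : (if List.foldl min x t = x then (0 : Int)
        else 1 + ((natIdxs t (List.foldl min x t)).headD 0 : Int))
      = ((natIdxs (x :: t) (List.foldl min x t)).headD 0 : Int) := by
    by_cases hx : List.foldl min x t = x
    · rw [if_pos hx, hx, natIdxs_cons_self]
      simp
    · have hmt : List.foldl min x t ∈ t := hmem.resolve_left hx
      have hxM : x ≠ List.foldl min x t := fun h => hx h.symm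
      rw [if_neg hx, natIdxs_cons_ne _ _ _ hxM,
        headD_map_succ _ (natIdxs_ne_nil _ _ hmt)]
      ring
  have hC : (if List.foldl min x t = x then (1 : Int) else 0)
        + (t.count (List.foldl min x t) : Int)
      = ((x :: t).count (List.foldl min x t) : Int) := by
    by_cases hx : List.foldl min x t = x
    · rw [if_pos hx, hx, count_cons_self']
      push_cast; ring
    · have hxM : x ≠ List.foldl min x t := fun h => hx h.symm
      rw [if_neg hx, count_cons_ne _ _ _ hxM]
      ring
  simp only [zero_add]
  rw [hI, hC]
  by_cases hcnt : (x :: t).count (List.foldl min x t) = 1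
  · -- unique minimum
    have hlen1 : (natIdxs (x :: t) (List.foldl min x t)).length = 1 := by
      rw [length_natIdxs]; exact hcnt
    obtain ⟨k, hk⟩ := List.length_eq_one_iff.mp hlen1
    have hkmem : k ∈ natIdxs (x :: t) (List.foldl min x t) := by rw [hk]; simp
    obtain ⟨hklt, hkval⟩ := (mem_natIdxs _ _ _).mp hkmem
    have hklt' : k < t.length + 1 := by simpa using hklt
    rw [hk]
    simp only [List.map_cons, List.map_nil, List.length_cons, List.length_nil,
      List.headD_cons, PySem.List.pyGetD_zero_cons]
    rw [if_neg (by omega)]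
    rw [hcnt]
    by_cases hk0 : (k : Int) = 0 ∨ (k : Int) = ((t.length + 1 : Nat) : Int) - 1
    · rw [if_pos hk0, if_neg (by push_cast at hk0 ⊢; omega)]
    · rw [if_neg hk0]
      push_cast at hk0
      have hk1n : k + 1 < (x :: t).length := by
        simp only [List.length_cons] at hklt ⊢
        omega
      -- pitches[k] is the minimum, pitches[k+1] is strictly above it
      have hgk : PySem.List.pyGetD (x :: t) (k : Int) 0 = List.foldl min x t := by
        rw [PySem.List.pyGetD_natCast, List.getD_eq_getElem _ _ hklt]
        rw [List.getD_eq_getElem _ _ hklt] at hkval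
        exact hkval
      have hgk1 : PySem.List.pyGetD (x :: t) ((k : Int) + 1) 0 = (x :: t).getD (k + 1) 0 := by
        have : (k : Int) + 1 = ((k + 1 : Nat) : Int) := by push_cast; ring
        rw [this, PySem.List.pyGetD_natCast]
      have hmin_le : List.foldl min x t ≤ (x :: t).getD (k + 1) 0 := by
        rw [List.getD_eq_getElem _ _ hk1n]
        have hm : (x :: t)[k + 1] ∈ x :: t := List.getElem_mem _
        rcases List.mem_cons.mp hm with h | h
        · rw [h]; exact hle
        · exact hlem _ h
      have hmin_ne : (x :: t).getD (k + 1) 0 ≠ List.foldl min x t := by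
        intro heq
        have : k + 1 ∈ natIdxs (x :: t) (List.foldl min x t) :=
          (mem_natIdxs _ _ _).mpr ⟨hk1n, heq⟩
        rw [hk] at this
        simp at this
      rw [if_neg (by rw [hgk, hgk1]; intro hle'; exact hmin_ne (le_antisymm hle' hmin_le))]
      rw [if_pos ⟨by norm_num, by push_cast at hk0 ⊢; omega⟩]
  · -- minimum not unique: both sides return (-1, 0)
    rw [if_pos (by rw [List.length_map, length_natIdxs]; exact hcnt)]
    rw [if_neg (by intro h; exact hcnt (by exact_mod_cast h.1))]
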